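-- pv_equiv track=rewrite | github.com/jinha2536/mdm-arithmetic | diffusion-arithmetic/experiments/exp_countdown.py | _rainbow_pad
-- ===== SOURCE A (Python) =====
-- MAX_ANS_LEN = 40
--
-- EOS_CHAR = '$'
--
-- RAINBOW_CHARS = 'abcdefghijklmnop'
--
-- def _rainbow_pad(output_str):
--     remaining = MAX_ANS_LEN - len(output_str)
--     if remaining <= 0:
--         return output_str[:MAX_ANS_LEN]
--     pad = EOS_CHAR
--     for i in range(remaining - 1):
--         pad += RAINBOW_CHARS[i % len(RAINBOW_CHARS)]
--     return output_str + pad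
-- ===== SOURCE B (Python) =====
-- MAX_ANS_LEN = 40
--
-- EOS_CHAR = '$'
--
-- RAINBOW_CHARS = 'abcdefghijklmnop'
--
-- def _rainbow_pad(output_str):
--     remaining = MAX_ANS_LEN - len(output_str)
--     if remaining <= 0:
--         return output_str[:MAX_ANS_LEN]
--     return output_str + EOS_CHAR + (RAINBOW_CHARS * 3)[:remaining - 1]
-- ===== Notes on version B (the rewrite author's own statement) =====
-- stated objective: idiomatic
-- what changed: The char-by-char loop with modulo indexing is replaced by a closed-form pad: repeat RAINBOW_CHARS enough times (3 covers the max 39 needed chars), slice it to length remaining minus one, and append it after the EOS char in one expression.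
import Mathlib
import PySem

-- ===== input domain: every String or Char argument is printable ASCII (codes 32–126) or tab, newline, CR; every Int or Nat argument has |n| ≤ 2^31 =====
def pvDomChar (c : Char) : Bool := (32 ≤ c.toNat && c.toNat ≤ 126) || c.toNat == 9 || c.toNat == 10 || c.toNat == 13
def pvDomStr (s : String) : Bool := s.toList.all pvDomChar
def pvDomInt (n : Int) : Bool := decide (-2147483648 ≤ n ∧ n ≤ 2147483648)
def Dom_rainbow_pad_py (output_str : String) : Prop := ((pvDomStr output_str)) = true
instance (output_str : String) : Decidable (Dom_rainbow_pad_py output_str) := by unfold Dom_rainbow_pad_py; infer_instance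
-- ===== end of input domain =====

-- B replaces the char-by-char modulo-indexed loop with a closed-form pad:
-- '$' followed by (RAINBOW_CHARS * 3) sliced to remaining - 1.

def pvRainbowChars : List Char := "abcdefghijklmnop".toList

-- ===== PORT A =====
-- pad loop of A: pad = '$'; for i in range(remaining-1): pad += RAINBOW_CHARS[i % 16]
-- (i % 16 is always in range, so RAINBOW_CHARS[i % 16] is ported with pyGetD; the default is never used)
def pvPadLoopA (m : Int) : List Char :=
  (PySem.List.pyRange 0 m 1).foldl
    (fun p i => p ++ [PySem.List.pyGetD pvRainbowChars (PySem.Int.mod i 16) ' ']) ['$']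

def rainbow_pad_py (output_str : String) : String :=
  let remaining : Int := 40 - PySem.Str.len output_str
  if remaining ≤ 0 then
    String.ofList (PySem.Chars.slice output_str.toList none (some 40))
  else
    String.ofList (output_str.toList ++ pvPadLoopA (remaining - 1))

-- ===== PORT B =====
def rainbow_pad_py_alt (output_str : String) : String :=
  let remaining : Int := 40 - PySem.Str.len output_str
  if remaining ≤ 0 then
    String.ofList (PySem.Chars.slice output_str.toList none (some 40))
  else
    String.ofList (output_str.toList ++
      '$' :: PySem.Chars.slice ((List.replicate 3 pvRainbowChars).flatten) none (some (remaining - 1)))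

-- ===== PRECONDITION & SPEC =====
def Spec_rainbow_pad_py (output_str : String) (out : String) : Prop := out = rainbow_pad_py_alt output_str
instance (output_str : String) (out : String) : Decidable (Spec_rainbow_pad_py output_str out) := by unfold Spec_rainbow_pad_py; infer_instance

-- ===== CLAIM (what is proved, stated in full; the proofs are below) =====
def Claim_equal_rainbow_pad_py : Prop := ∀ (output_str : String), Dom_rainbow_pad_py output_str → Spec_rainbow_pad_py output_str (rainbow_pad_py output_str)

-- ===== LEMMAS AND PROOFS =====

-- the two pads agree for every needed length m ≤ 39 (finite check)
lemma pad_eq_fin : ∀ k : Fin 40,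
    pvPadLoopA ((k.val : Nat) : Int)
      = '$' :: PySem.Chars.slice ((List.replicate 3 pvRainbowChars).flatten) none (some ((k.val : Nat) : Int)) := by
  decide

lemma pad_eq (m : Nat) (hm : m ≤ 39) :
    pvPadLoopA ((m : Nat) : Int)
      = '$' :: PySem.Chars.slice ((List.replicate 3 pvRainbowChars).flatten) none (some ((m : Nat) : Int)) :=
  pad_eq_fin ⟨m, by omega⟩

-- ===== VERDICT (by name: the statement is the Claim_ definition above) =====
theorem rainbow_pad_py_spec : Claim_equal_rainbow_pad_py := by
  intro s _
  unfold Spec_rainbow_pad_py rainbow_pad_py rainbow_pad_py_alt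
  simp only [PySem.Str.len_eq]
  set n := s.toList.length with hn
  by_cases h : (40 : Int) - n ≤ 0
  · simp [h]
  · simp only [h, if_false]
    have hlt : n ≤ 39 := by omega
    have hcast : (40 : Int) - n - 1 = ((39 - n : Nat) : Int) := by omega
    rw [hcast, pad_eq (39 - n) (by omega)]
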